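-- pv_equiv track=rewrite | github.com/grahamplace/etudes | python/grid_illumination.py | check_diag_two
-- ===== SOURCE A (Python) =====
-- def check_diag_two(n, lamp, query):
--     # move down and right
--     i = lamp[0]
--     j = lamp[1]
--     while i <= n and j > 0:
--         if i == query[0] and j == query[1]:
--             return True
--         i += 1
--         j += -1
--
--     # move up and left
--     i = lamp[0]
--     j = lamp[1]
--     while i > 0 and j <= n:
--         if i == query[0] and j == query[1]:
--             return True
--         i += -1
--         j += 1
-- ===== SOURCE B (Python) =====
-- def check_diag_two(n, lamp, query):
--     # The query lies on the lamp's anti-diagonal iff the coordinate sums are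
--     # equal and the query falls inside the stretch of that diagonal the grid covers.
--     i0, j0 = lamp[0], lamp[1]
--     qi, qj = query[0], query[1]
--     if qi + qj == i0 + j0:
--         if (i0 <= qi <= n and qj > 0) or (0 < qi <= i0 and qj <= n):
--             return True
-- ===== Notes on version B (the rewrite author's own statement) =====
-- stated objective: simpler
-- what changed: Replaces A's two step-by-step walks along the anti-diagonal by a direct arithmetic test: equal coordinate sums plus the bound checks that describe the span the walks cover.
-- outside the precondition, e.g. on check_diag_two(0, [1, 1], []): A returns None, B raises IndexError
import Mathlib
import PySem

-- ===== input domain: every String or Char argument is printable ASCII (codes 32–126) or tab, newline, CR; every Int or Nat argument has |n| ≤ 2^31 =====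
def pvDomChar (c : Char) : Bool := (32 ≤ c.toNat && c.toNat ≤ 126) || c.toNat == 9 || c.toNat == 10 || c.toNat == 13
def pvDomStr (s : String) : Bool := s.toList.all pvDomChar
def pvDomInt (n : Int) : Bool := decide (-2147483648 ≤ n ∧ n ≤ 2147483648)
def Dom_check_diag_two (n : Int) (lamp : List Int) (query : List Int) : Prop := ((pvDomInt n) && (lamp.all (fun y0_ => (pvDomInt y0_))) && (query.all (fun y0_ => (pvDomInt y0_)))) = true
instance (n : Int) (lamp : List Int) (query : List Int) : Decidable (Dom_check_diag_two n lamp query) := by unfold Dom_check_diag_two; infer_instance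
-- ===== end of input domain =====

-- B replaces A's two step-by-step anti-diagonal walks by a direct arithmetic membership test (objective: simpler).


-- ===== PORT A =====
-- first while loop: move down and right (i += 1, j -= 1)
def cdLoop1 (n qi qj i j : Int) : Option Bool :=
  if i ≤ n ∧ 0 < j then
    if i = qi ∧ j = qj then some true
    else cdLoop1 n qi qj (i + 1) (j - 1)
  else none
termination_by j.toNat
decreasing_by omega

-- second while loop: move up and left (i -= 1, j += 1)
def cdLoop2 (n qi qj i j : Int) : Option Bool :=
  if 0 < i ∧ j ≤ n then
    if i = qi ∧ j = qj then some true
    else cdLoop2 n qi qj (i - 1) (j + 1)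
  else none
termination_by i.toNat
decreasing_by omega

def check_diag_two (n : Int) (lamp : List Int) (query : List Int) : Option Bool :=
  match PySem.List.pyGet? lamp 0, PySem.List.pyGet? lamp 1,
        PySem.List.pyGet? query 0, PySem.List.pyGet? query 1 with
  | some i0, some j0, some qi, some qj =>
      match cdLoop1 n qi qj i0 j0 with
      | some b => some b
      | none => cdLoop2 n qi qj i0 j0
  | _, _, _, _ => none

-- ===== PORT B =====
def check_diag_two_alt (n : Int) (lamp : List Int) (query : List Int) : Option Bool :=
  (PySem.List.pyGet? lamp 0).bind fun i0 =>
    (PySem.List.pyGet? lamp 1).bind fun j0 =>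
      (PySem.List.pyGet? query 0).bind fun qi =>
        (PySem.List.pyGet? query 1).bind fun qj =>
          if qi + qj = i0 + j0 ∧
             ((i0 ≤ qi ∧ qi ≤ n ∧ 0 < qj) ∨ (0 < qi ∧ qi ≤ i0 ∧ qj ≤ n)) then
            some true
          else none

-- ===== PRECONDITION & SPEC =====
-- Pre_ excludes too-short lamp/query lists: A raises IndexError there, except in the
-- accidental corner where both loops run zero iterations and query is never indexed.
def Pre_check_diag_two (n : Int) (lamp : List Int) (query : List Int) : Prop :=
  2 ≤ lamp.length ∧ 2 ≤ query.length
instance (n : Int) (lamp : List Int) (query : List Int) : Decidable (Pre_check_diag_two n lamp query) := by unfold Pre_check_diag_two; infer_instance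
def pvWitness_check_diag_two : Int × List Int × List Int := (5, [2, 3], [4, 1])

def Spec_check_diag_two (n : Int) (lamp : List Int) (query : List Int) (out : Option Bool) : Prop := out = check_diag_two_alt n lamp query
instance (n : Int) (lamp : List Int) (query : List Int) (out : Option Bool) : Decidable (Spec_check_diag_two n lamp query out) := by unfold Spec_check_diag_two; infer_instance

-- ===== CLAIM =====
def Claim_equal_check_diag_two : Prop := ∀ (n : Int) (lamp : List Int) (query : List Int), Dom_check_diag_two n lamp query → Pre_check_diag_two n lamp query → Spec_check_diag_two n lamp query (check_diag_two n lamp query)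

-- ===== LEMMAS AND PROOFS =====
lemma cdLoop1_eq (n qi qj : Int) : ∀ i j : Int,
    cdLoop1 n qi qj i j =
      if qi + qj = i + j ∧ i ≤ qi ∧ qi ≤ n ∧ 0 < qj then some true else none := by
  intro i j
  induction i, j using cdLoop1.induct n qi qj with
  | case1 i j hc hq =>
      rw [cdLoop1]
      simp only [if_pos hc, if_pos hq]
      rw [if_pos (by omega)]
  | case2 i j hc hq ih =>
      rw [cdLoop1]
      simp only [if_pos hc, if_neg hq, ih]
      by_cases h : qi + qj = i + j ∧ i ≤ qi ∧ qi ≤ n ∧ 0 < qj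
      · rw [if_pos (by omega), if_pos h]
      · rw [if_neg (by omega), if_neg h]
  | case3 i j hc =>
      rw [cdLoop1]
      rw [if_neg hc, if_neg (by omega)]

lemma cdLoop2_eq (n qi qj : Int) : ∀ i j : Int,
    cdLoop2 n qi qj i j =
      if qi + qj = i + j ∧ 0 < qi ∧ qi ≤ i ∧ qj ≤ n then some true else none := by
  intro i j
  induction i, j using cdLoop2.induct n qi qj with
  | case1 i j hc hq =>
      rw [cdLoop2]
      simp only [if_pos hc, if_pos hq]
      rw [if_pos (by omega)]
  | case2 i j hc hq ih =>
      rw [cdLoop2]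
      simp only [if_pos hc, if_neg hq, ih]
      by_cases h : qi + qj = i + j ∧ 0 < qi ∧ qi ≤ i ∧ qj ≤ n
      · rw [if_pos (by omega), if_pos h]
      · rw [if_neg (by omega), if_neg h]
  | case3 i j hc =>
      rw [cdLoop2]
      rw [if_neg hc, if_neg (by omega)]

-- ===== VERDICT =====
theorem check_diag_two_spec : Claim_equal_check_diag_two := by
  intro n lamp query _ hpre
  obtain ⟨hl, hq⟩ := hpre
  match lamp, query with
  | i0 :: j0 :: _, qi :: qj :: _ =>
    unfold Spec_check_diag_two check_diag_two check_diag_two_alt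
    simp only [Option.bind]
    simp [PySem.List.pyGet?, PySem.List.pyIdx?,
          show ∀ m : Nat, (0:Int) ≤ (m:Int) + 1 from fun m => by positivity]
    rw [cdLoop1_eq, cdLoop2_eq]
    by_cases h1 : qi + qj = i0 + j0 ∧ i0 ≤ qi ∧ qi ≤ n ∧ 0 < qj
    · rw [if_pos h1]
      have hb : qi + qj = i0 + j0 ∧
          (i0 ≤ qi ∧ qi ≤ n ∧ 0 < qj ∨ 0 < qi ∧ qi ≤ i0 ∧ qj ≤ n) := ⟨h1.1, Or.inl h1.2⟩
      simp [hb]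
    · rw [if_neg h1]
      by_cases h2 : qi + qj = i0 + j0 ∧ 0 < qi ∧ qi ≤ i0 ∧ qj ≤ n
      · rw [if_pos h2]
        have hb : qi + qj = i0 + j0 ∧
            (i0 ≤ qi ∧ qi ≤ n ∧ 0 < qj ∨ 0 < qi ∧ qi ≤ i0 ∧ qj ≤ n) := ⟨h2.1, Or.inr h2.2⟩
        simp [hb]
      · rw [if_neg h2]
        have hb : ¬ (qi + qj = i0 + j0 ∧
            (i0 ≤ qi ∧ qi ≤ n ∧ 0 < qj ∨ 0 < qi ∧ qi ≤ i0 ∧ qj ≤ n)) := by tauto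
        simp [hb]
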